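-- pv_equiv track=rewrite | github.com/confiself/seq2seq-master | deploy/models.py | _filter_most_words
-- ===== SOURCE A (Python) =====
-- def _filter_most_words(outputs):
--     words_count_dict = {x: len(set(x)) for x in outputs}
--     words_count_list = sorted(words_count_dict.items(), key=lambda x: x[1], reverse=True)
--     words = []
--     for i, item in enumerate(words_count_list):
--         if item[1] == words_count_list[0][1]:
--             words.append(item[0])
--     return words
-- ===== SOURCE B (Python) =====
-- def _filter_most_words(outputs):
--     distinct = list(dict.fromkeys(outputs))
--     if not distinct:
--         return []
--     m = max(len(set(x)) for x in distinct)
--     return [x for x in distinct if len(set(x)) == m]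
-- ===== Notes on version B (the rewrite author's own statement) =====
-- stated objective: simpler
-- what changed: B replaces A's per-word count dict plus full descending sort plus enumerate-scan by: dedup via dict.fromkeys, one max() over distinct-character counts, and one filter comprehension keeping words that attain it.
import Mathlib
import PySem

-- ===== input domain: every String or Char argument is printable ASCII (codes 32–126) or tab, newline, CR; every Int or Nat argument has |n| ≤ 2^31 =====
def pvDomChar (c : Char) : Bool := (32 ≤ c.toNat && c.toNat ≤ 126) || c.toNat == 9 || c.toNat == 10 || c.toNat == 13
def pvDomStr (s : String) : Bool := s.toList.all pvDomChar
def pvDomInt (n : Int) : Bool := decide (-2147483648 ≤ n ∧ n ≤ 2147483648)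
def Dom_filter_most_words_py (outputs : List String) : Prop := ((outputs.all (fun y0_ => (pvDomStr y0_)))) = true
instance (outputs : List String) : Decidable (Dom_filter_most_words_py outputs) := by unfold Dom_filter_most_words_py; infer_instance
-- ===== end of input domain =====

-- B drops A's count-dict + full descending sort + enumerate-scan in favour of
-- dedup-then-max-then-filter: simpler, no sort. Return values proved equal on all inputs.


-- ===== PORT A =====
def filter_most_words_py (outputs : List String) : List String :=
  -- words_count_dict = {x: len(set(x)) for x in outputs}
  let words_count_dict : PySem.Dict String Int :=
    outputs.foldl (fun d x => d.insert x ((PySem.Set.ofList x.toList).length : Int)) PySem.Dict.empty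
  -- words_count_list = sorted(words_count_dict.items(), key=lambda x: x[1], reverse=True)
  let words_count_list := PySem.List.sorted words_count_dict.items (fun x => x.2) true
  -- for i, item in enumerate(words_count_list): if item[1] == words_count_list[0][1]: words.append(item[0])
  (PySem.List.enumerate words_count_list).foldl
    (fun words it =>
      if (PySem.List.pyGet? words_count_list 0).map (fun p => p.2) = some it.2.2
      then words ++ [it.2.1] else words) []

-- ===== PORT B =====
def filter_most_words_py_alt (outputs : List String) : List String :=
  -- distinct = list(dict.fromkeys(outputs))
  let distinct := PySem.List.dedup outputs
  -- if not distinct: return []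
  if distinct.isEmpty then []
  else
    -- m = max(len(set(x)) for x in distinct)
    match PySem.List.max? (distinct.map (fun x => ((PySem.Set.ofList x.toList).length : Int))) (fun v => v) with
    | none => []
    | some m =>
      -- [x for x in distinct if len(set(x)) == m]
      distinct.filter (fun x => ((PySem.Set.ofList x.toList).length : Int) == m)

-- ===== PRECONDITION & SPEC =====
def Spec_filter_most_words_py (outputs : List String) (out : List String) : Prop := out = filter_most_words_py_alt outputs
instance (outputs : List String) (out : List String) : Decidable (Spec_filter_most_words_py outputs out) := by unfold Spec_filter_most_words_py; infer_instance

-- ===== CLAIM (what is proved, stated in full; the proofs are below) =====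
def Claim_equal_filter_most_words_py : Prop := ∀ (outputs : List String), Dom_filter_most_words_py outputs → Spec_filter_most_words_py outputs (filter_most_words_py outputs)

-- ===== LEMMAS AND PROOFS =====

-- distinct-character count of a word, as both ports compute it
def pvCnt (s : String) : Int := ((PySem.Set.ofList s.toList).length : Int)

-- A's dict comprehension builds exactly the first-occurrence dedup list paired with counts
lemma dict_items_eq (xs acc : List String) :
    (xs.foldl (fun d x => d.insert x (pvCnt x)) (PySem.Dict.mk (acc.map (fun x => (x, pvCnt x))))).items
      = (xs.foldl PySem.Set.add acc).map (fun x => (x, pvCnt x)) := by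
  induction xs generalizing acc with
  | nil => simp
  | cons x xs ih =>
    by_cases hmem : x ∈ acc
    · have hcb : (PySem.Dict.mk (acc.map (fun y => (y, pvCnt y)))).contains x = true := by
        simp [PySem.Dict.contains, List.any_map, Function.comp_def]
        exact hmem
      have hins : (PySem.Dict.mk (acc.map (fun y => (y, pvCnt y)))).insert x (pvCnt x)
          = PySem.Dict.mk (acc.map (fun y => (y, pvCnt y))) := by
        simp only [PySem.Dict.insert, hcb, if_pos]
        congr 1
        simp only [List.map_map]
        apply List.map_congr_left
        intro y _
        by_cases hyx : y = x
        · subst hyx; simp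
        · simp [hyx]
      have hadd : PySem.Set.add acc x = acc := by
        simp [PySem.Set.add, PySem.Set.contains, hmem]
      simp only [List.foldl_cons, hins, hadd, ih]
    · have hcb : (PySem.Dict.mk (acc.map (fun y => (y, pvCnt y)))).contains x = false := by
        simp [PySem.Dict.contains, List.any_map, Function.comp_def]
        exact fun y hy hyx => hmem (hyx ▸ hy)
      have hins : (PySem.Dict.mk (acc.map (fun y => (y, pvCnt y)))).insert x (pvCnt x)
          = PySem.Dict.mk ((acc ++ [x]).map (fun y => (y, pvCnt y))) := by
        simp [PySem.Dict.insert, hcb]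
      have hadd : PySem.Set.add acc x = acc ++ [x] := by
        simp [PySem.Set.add, PySem.Set.contains, hmem]
      simp only [List.foldl_cons, hins, hadd, ih]

-- inserting an element whose key is bounded by M into a descending list: its
-- max-filtered part gains x at the END iff key x = M
lemma filter_insertBy_max {α : Type} (key : α → Int) (M : Int) (x : α) (S : List α)
    (hS : S.Pairwise (fun a b => key b ≤ key a)) (hSM : ∀ y ∈ S, key y ≤ M) :
    (PySem.List.insertBy (fun a b => decide (key b < key a)) x S).filter (fun y => key y == M)
      = S.filter (fun y => key y == M) ++ (if key x == M then [x] else []) := by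
  induction S with
  | nil =>
    by_cases h : key x = M <;> simp [PySem.List.insertBy, h]
  | cons y ys ih =>
    rw [List.pairwise_cons] at hS
    by_cases hlt : key y < key x
    · have hstep : PySem.List.insertBy (fun a b => decide (key b < key a)) x (y :: ys)
          = x :: y :: ys := by simp [PySem.List.insertBy, hlt]
      rw [hstep]
      by_cases hxM : key x = M
      · have hall : ∀ z ∈ y :: ys, ¬ (key z == M) = true := by
          intro z hz
          have hzy : key z ≤ key y := by
            rcases List.mem_cons.mp hz with rfl | hz'
            · exact le_refl _
            · exact hS.1 z hz'
          simp only [beq_iff_eq]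
          omega
        rw [List.filter_cons_of_pos (by simp [hxM]), List.filter_eq_nil_iff.mpr hall]
        simp [hxM]
      · rw [List.filter_cons_of_neg (by simp [hxM])]
        simp [hxM]
    · have hstep : PySem.List.insertBy (fun a b => decide (key b < key a)) x (y :: ys)
          = y :: PySem.List.insertBy (fun a b => decide (key b < key a)) x ys := by
        simp [PySem.List.insertBy, hlt]
      rw [hstep]
      have hrec := ih hS.2 (fun z hz => hSM z (List.mem_cons_of_mem _ hz))
      by_cases hyM : key y = M
      · rw [List.filter_cons_of_pos (by simp [hyM]), List.filter_cons_of_pos (by simp [hyM]),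
            hrec]
        simp
      · rw [List.filter_cons_of_neg (by simp [hyM]), List.filter_cons_of_neg (by simp [hyM]),
            hrec]

-- stability at the maximum: filtering the max-key elements out of the reverse-sorted
-- list gives them in their original order
lemma filter_sorted_rev_max {α : Type} (key : α → Int) (xs : List α) (M : Int)
    (hM : ∀ y ∈ xs, key y ≤ M) :
    (PySem.List.sorted xs key true).filter (fun y => key y == M)
      = xs.filter (fun y => key y == M) := by
  induction xs using List.reverseRecOn with
  | nil => simp [PySem.List.sorted]
  | append_singleton xs x ih =>
    have hsplit : PySem.List.sorted (xs ++ [x]) key true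
        = PySem.List.insertBy (fun a b => decide (key b < key a)) x (PySem.List.sorted xs key true) := by
      rw [PySem.List.sorted_rev_eq_foldl_insertBy, PySem.List.sorted_rev_eq_foldl_insertBy,
          List.foldl_append]
      simp
    have hMxs : ∀ y ∈ xs, key y ≤ M := fun y hy => hM y (List.mem_append_left _ hy)
    have hSM : ∀ y ∈ PySem.List.sorted xs key true, key y ≤ M := by
      intro y hy; exact hMxs y ((PySem.List.mem_sorted xs key true y).mp hy)
    rw [hsplit,
        filter_insertBy_max key M x _ (PySem.List.sorted_pairwise_rev xs key) hSM,
        ih hMxs, List.filter_append]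
    by_cases h : key x = M <;> simp [h]

-- A's enumerate loop, with the predicate and projection depending only on the item
lemma filter_map_enumerate {α β : Type} (q : α → Bool) (f : α → β) (xs : List α) (s : Int) :
    ((PySem.List.enumerate xs s).filter (fun it => q it.2)).map (fun it => f it.2)
      = (xs.filter q).map f := by
  induction xs generalizing s with
  | nil => simp [PySem.List.enumerate_nil]
  | cons x xs ih =>
    rw [PySem.List.enumerate_cons]
    by_cases hq : q x = true
    · rw [List.filter_cons_of_pos (by simpa using hq), List.filter_cons_of_pos hq]
      simp only [List.map_cons, ih]
    · rw [List.filter_cons_of_neg (by simpa using hq), List.filter_cons_of_neg hq]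
      exact ih _

-- projecting the filtered count pairs back to words
lemma filter_map_pair (M : Int) (l : List String) :
    ((l.map (fun x => (x, pvCnt x))).filter (fun p => p.2 == M)).map (fun p => p.1)
      = l.filter (fun x => pvCnt x == M) := by
  induction l with
  | nil => rfl
  | cons x l ih =>
    by_cases hx : pvCnt x = M
    · rw [List.map_cons, List.filter_cons_of_pos (by simp [hx]),
          List.filter_cons_of_pos (by simp [hx]), List.map_cons, ih]
    · rw [List.map_cons, List.filter_cons_of_neg (by simp [hx]),
          List.filter_cons_of_neg (by simp [hx]), ih]

theorem filter_most_words_py_eq (outputs : List String) :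
    filter_most_words_py outputs = filter_most_words_py_alt outputs := by
  have hitems :
      (outputs.foldl (fun d x => d.insert x ((PySem.Set.ofList x.toList).length : Int)) PySem.Dict.empty).items
        = (PySem.List.dedup outputs).map (fun x => (x, pvCnt x)) := by
    have h := dict_items_eq outputs []
    simpa [PySem.Dict.empty, PySem.List.dedup, PySem.Set.ofList, PySem.Set.empty, pvCnt] using h
  show (PySem.List.enumerate (PySem.List.sorted
          (outputs.foldl (fun d x => d.insert x ((PySem.Set.ofList x.toList).length : Int)) PySem.Dict.empty).items
          (fun x => x.2) true)).foldl
        (fun words it =>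
          if (PySem.List.pyGet? (PySem.List.sorted
              (outputs.foldl (fun d x => d.insert x ((PySem.Set.ofList x.toList).length : Int)) PySem.Dict.empty).items
              (fun x => x.2) true) 0).map (fun p => p.2) = some it.2.2
          then words ++ [it.2.1] else words) []
      = filter_most_words_py_alt outputs
  rw [hitems]
  set D := PySem.List.dedup outputs with hD
  set L := D.map (fun x => (x, pvCnt x)) with hL
  cases hS : PySem.List.sorted L (fun x => x.2) true with
  | nil =>
    have hLnil : L = [] := (PySem.List.sorted_eq_nil_iff L _ true).mp hS
    have hDnil : D = [] := by
      cases hDc : D with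
      | nil => rfl
      | cons d ds => rw [hL, hDc] at hLnil; simp at hLnil
    show ([] : List String) = filter_most_words_py_alt outputs
    unfold filter_most_words_py_alt
    rw [← hD, hDnil]
    rfl
  | cons h t =>
    set M := h.2 with hM
    have hub : ∀ y ∈ L, y.2 ≤ M := PySem.List.key_head_sorted_rev_ge L (fun x => x.2) hS
    have hget : (PySem.List.pyGet? (h :: t) 0).map (fun p => p.2) = some M := by
      simp [PySem.List.pyGet?, PySem.List.pyIdx?, hM]
    have hloop :
        (PySem.List.enumerate (h :: t)).foldl
          (fun words it =>
            if (PySem.List.pyGet? (h :: t) 0).map (fun p => p.2) = some it.2.2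
            then words ++ [it.2.1] else words) []
          = (((h :: t).filter (fun p => p.2 == M)).map (fun p => p.1)) := by
      calc (PySem.List.enumerate (h :: t)).foldl
            (fun words it =>
              if (PySem.List.pyGet? (h :: t) 0).map (fun p => p.2) = some it.2.2
              then words ++ [it.2.1] else words) []
          = (PySem.List.enumerate (h :: t)).foldl
            (fun words it => if ((it.2.2 == M) = true)
              then words ++ [it.2.1] else words) [] := by
            apply PySem.List.foldl_congr_mem
            intro ws it _
            rw [hget]
            by_cases he : it.2.2 = M
            · rw [if_pos (by rw [he]), if_pos (by simpa using he)]
            · rw [if_neg (fun hh => he (Option.some.inj hh).symm), if_neg (by simpa using he)]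
        _ = _ := by
            have hfold := PySem.List.foldl_append_if
              (fun (it : Int × String × Int) => it.2.2 == M) (fun it => it.2.1)
              (PySem.List.enumerate (h :: t)) []
            rw [hfold]
            simp only [List.nil_append]
            exact filter_map_enumerate (fun (p : String × Int) => p.2 == M) (fun p => p.1) (h :: t) 0
    rw [hloop, ← hS, filter_sorted_rev_max (fun p => p.2) L M hub, hL, filter_map_pair M D]
    -- B's side: D is nonempty and its maximum count is exactly M
    have hhL : h ∈ L := by
      rw [← PySem.List.mem_sorted L (fun x => x.2) true, hS]; exact List.mem_cons_self ..
    have hDne : D ≠ [] := by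
      intro hnil; rw [hL, hnil] at hhL; simp at hhL
    have hmapeq : D.map (fun x => ((PySem.Set.ofList x.toList).length : Int)) = L.map (fun p => p.2) := by
      rw [hL, List.map_map]; rfl
    have hmax : PySem.List.max? (D.map (fun x => ((PySem.Set.ofList x.toList).length : Int))) (fun v => v)
        = some M := by
      cases hmx : PySem.List.max? (D.map (fun x => ((PySem.Set.ofList x.toList).length : Int))) (fun v => v) with
      | none =>
        rw [PySem.List.max?_eq_none_iff, hmapeq, List.map_eq_nil_iff] at hmx
        rw [hmx] at hhL; simp at hhL
      | some m =>
        have hmem : m ∈ L.map (fun p => p.2) := by rw [← hmapeq]; exact PySem.List.max?_mem hmx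
        obtain ⟨p, hp, hpm⟩ := List.mem_map.mp hmem
        have h1 : m ≤ M := hpm ▸ hub p hp
        have h2 : M ≤ m := by
          have hall := PySem.List.max?_isMax hmx
          exact hall M (by rw [hmapeq]; exact List.mem_map.mpr ⟨h, hhL, rfl⟩)
        exact congrArg some (le_antisymm h1 h2)
    have hne : D.isEmpty = false := by
      cases hDc : D with
      | nil => exact absurd hDc hDne
      | cons a as => rfl
    show List.filter (fun x => pvCnt x == M) D
        = (if D.isEmpty = true then [] else
            match PySem.List.max? (D.map (fun x => ((PySem.Set.ofList x.toList).length : Int))) (fun v => v) with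
            | none => []
            | some m => D.filter (fun x => ((PySem.Set.ofList x.toList).length : Int) == m))
    rw [hmax, hne]
    simp only [Bool.false_eq_true, if_false, pvCnt]

-- ===== VERDICT (by name: the statement is the Claim_ definition above) =====
theorem filter_most_words_py_spec : Claim_equal_filter_most_words_py := by
  intro outputs _
  exact filter_most_words_py_eq outputs
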